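-- pv_equiv track=rewrite | github.com/CatInOrange/alice_chat | backend/app/services/tavern/macro_runtime.py | normalize_legacy_angle_bracket_placeholders
-- ===== SOURCE A (Python) =====
-- def normalize_legacy_angle_bracket_placeholders(text: str) -> str:
--     normalized = str(text or '')
--     if not normalized:
--         return ''
--     replacements = {
--         '<user>': '{{user}}',
--         '<USER>': '{{user}}',
--         '<char>': '{{char}}',
--         '<CHAR>': '{{char}}',
--         '<persona>': '{{persona}}',
--         '<PERSONA>': '{{persona}}',
--     }
--     for src, dst in replacements.items():
--         normalized = normalized.replace(src, dst)
--     return normalized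
-- ===== SOURCE B (Python) =====
-- def normalize_legacy_angle_bracket_placeholders(text: str) -> str:
--     # One left-to-right scan matching the six literal tokens in place of six full replace passes.
--     normalized = str(text or '')
--     if not normalized:
--         return ''
--     parts = []
--     i = 0
--     n = len(normalized)
--     while i < n:
--         if normalized.startswith('<user>', i):
--             parts.append('{{user}}'); i += 6
--         elif normalized.startswith('<USER>', i):
--             parts.append('{{user}}'); i += 6
--         elif normalized.startswith('<char>', i):
--             parts.append('{{char}}'); i += 6
--         elif normalized.startswith('<CHAR>', i):
--             parts.append('{{char}}'); i += 6
--         elif normalized.startswith('<persona>', i):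
--             parts.append('{{persona}}'); i += 9
--         elif normalized.startswith('<PERSONA>', i):
--             parts.append('{{persona}}'); i += 9
--         else:
--             parts.append(normalized[i]); i += 1
--     return ''.join(parts)
-- ===== Notes on version B (the rewrite author's own statement) =====
-- stated objective: alternative
-- what changed: Replaces A's six sequential full-string replace passes (one per literal token) with a single left-to-right scan that, at each position, matches one of the six angle-bracket tokens and emits its brace form, collecting pieces and joining once.
import Mathlib
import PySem

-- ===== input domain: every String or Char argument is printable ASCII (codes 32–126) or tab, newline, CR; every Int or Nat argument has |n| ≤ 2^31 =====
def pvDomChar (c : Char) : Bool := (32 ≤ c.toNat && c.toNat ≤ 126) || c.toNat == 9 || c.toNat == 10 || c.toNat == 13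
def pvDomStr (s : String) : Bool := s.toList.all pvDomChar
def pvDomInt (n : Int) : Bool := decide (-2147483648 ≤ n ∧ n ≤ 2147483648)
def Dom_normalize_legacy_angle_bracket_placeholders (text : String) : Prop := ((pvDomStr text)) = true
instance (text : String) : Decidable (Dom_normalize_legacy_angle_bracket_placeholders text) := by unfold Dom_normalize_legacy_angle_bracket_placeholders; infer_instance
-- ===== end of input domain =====

-- B replaces A's six sequential full-string replace passes by a single left-to-right scan
-- that matches the six literal tokens in place (objective: alternative; return value only).

-- ===== PORT A =====
def normalize_legacy_angle_bracket_placeholders (text : String) : String :=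
  let normalized := if text = "" then "" else text   -- str(text or '')
  if normalized = "" then ""
  else
    -- for src, dst in replacements.items(): normalized = normalized.replace(src, dst)
    let n1 := PySem.Str.replace normalized "<user>" "{{user}}"
    let n2 := PySem.Str.replace n1 "<USER>" "{{user}}"
    let n3 := PySem.Str.replace n2 "<char>" "{{char}}"
    let n4 := PySem.Str.replace n3 "<CHAR>" "{{char}}"
    let n5 := PySem.Str.replace n4 "<persona>" "{{persona}}"
    let n6 := PySem.Str.replace n5 "<PERSONA>" "{{persona}}"
    n6

-- ===== PORT B =====
-- the while loop of Source B: one scan over the remaining suffix, matching the six tokens in order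
def pvScanB : List Char → List Char
  | [] => []
  | c :: t =>
    if ("<user>".toList).isPrefixOf (c :: t) then "{{user}}".toList ++ pvScanB (t.drop 5)
    else if ("<USER>".toList).isPrefixOf (c :: t) then "{{user}}".toList ++ pvScanB (t.drop 5)
    else if ("<char>".toList).isPrefixOf (c :: t) then "{{char}}".toList ++ pvScanB (t.drop 5)
    else if ("<CHAR>".toList).isPrefixOf (c :: t) then "{{char}}".toList ++ pvScanB (t.drop 5)
    else if ("<persona>".toList).isPrefixOf (c :: t) then "{{persona}}".toList ++ pvScanB (t.drop 8)
    else if ("<PERSONA>".toList).isPrefixOf (c :: t) then "{{persona}}".toList ++ pvScanB (t.drop 8)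
    else c :: pvScanB t
termination_by l => l.length
decreasing_by all_goals (simp only [List.length_drop, List.length_cons]; omega)

def normalize_legacy_angle_bracket_placeholders_alt (text : String) : String :=
  let normalized := if text = "" then "" else text   -- str(text or '')
  if normalized = "" then ""
  else String.ofList (pvScanB normalized.toList)    -- ''.join(parts)

-- ===== PRECONDITION & SPEC =====
def Spec_normalize_legacy_angle_bracket_placeholders (text : String) (out : String) : Prop := out = normalize_legacy_angle_bracket_placeholders_alt text
instance (text : String) (out : String) : Decidable (Spec_normalize_legacy_angle_bracket_placeholders text out) := by unfold Spec_normalize_legacy_angle_bracket_placeholders; infer_instance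

-- ===== CLAIM (what is proved, stated in full; the proofs are below) =====
def Claim_equal_normalize_legacy_angle_bracket_placeholders : Prop := ∀ (text : String), Dom_normalize_legacy_angle_bracket_placeholders text → Spec_normalize_legacy_angle_bracket_placeholders text (normalize_legacy_angle_bracket_placeholders text)

-- ===== LEMMAS AND PROOFS =====

-- fuel-free form of PySem.Chars.replace (for a nonempty pattern)
def pvRepl (old new : List Char) : List Char → List Char
  | [] => []
  | c :: t =>
    if old.isPrefixOf (c :: t) then new ++ pvRepl old new (t.drop (old.length - 1))
    else c :: pvRepl old new t
termination_by l => l.length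
decreasing_by all_goals (simp only [List.length_drop, List.length_cons]; omega)

theorem pvGo_eq (old new : List Char) (hold : old ≠ []) :
    ∀ (fuel : Nat) (l acc : List Char), l.length ≤ fuel →
      PySem.Chars.replace.go old new fuel l acc = acc.reverse ++ pvRepl old new l := by
  intro fuel
  induction fuel with
  | zero =>
    intro l acc h
    have : l = [] := List.eq_nil_of_length_eq_zero (Nat.le_zero.mp h)
    subst this
    simp [PySem.Chars.replace.go, pvRepl]
  | succ fuel ih =>
    intro l acc h
    match l with
    | [] => simp [PySem.Chars.replace.go, pvRepl]
    | c :: t =>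
      have hlen : 1 ≤ old.length := List.length_pos_iff.mpr hold
      have hd : List.drop old.length (c :: t) = t.drop (old.length - 1) := by
        obtain ⟨o, os, rfl⟩ : ∃ o os, old = o :: os := by
          cases old with
          | nil => exact absurd rfl hold
          | cons o os => exact ⟨o, os, rfl⟩
        simp
      rw [PySem.Chars.replace.go]
      by_cases hp : old.isPrefixOf (c :: t)
      · simp only [hp, if_true]
        rw [hd, ih _ _ (by simp at h; simp; omega)]
        rw [pvRepl]
        simp [hp]
      · simp only [hp]
        rw [ih t (c :: acc) (by simp at h; omega)]
        rw [pvRepl]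
        simp [hp]

theorem pvReplace_eq (old new s : List Char) (hold : old ≠ []) :
    PySem.Chars.replace s old new = pvRepl old new s := by
  rw [PySem.Chars.replace]
  simp [List.isEmpty_iff, hold]
  exact pvGo_eq old new hold s.length s [] (le_refl _)

theorem pvRepl_cons_pos (old new : List Char) (c : Char) (t : List Char)
    (h : old.isPrefixOf (c :: t) = true) :
    pvRepl old new (c :: t) = new ++ pvRepl old new (t.drop (old.length - 1)) := by
  rw [pvRepl]; simp [h]

theorem pvRepl_cons_neg (old new : List Char) (c : Char) (t : List Char)
    (h : ¬ old.isPrefixOf (c :: t) = true) :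
    pvRepl old new (c :: t) = c :: pvRepl old new t := by
  rw [pvRepl]; simp [h]

theorem pvRepl_nil (old new : List Char) : pvRepl old new [] = [] := by rw [pvRepl]

-- a token starts with '<'; it skips over any block without '<'
theorem pvRepl_append (T' D a y : List Char) (ha : ('<' : Char) ∉ a) :
    pvRepl ('<' :: T') D (a ++ y) = a ++ pvRepl ('<' :: T') D y := by
  induction a with
  | nil => simp
  | cons c a ih =>
    have hc : c ≠ '<' := fun h => ha (by simp [h])
    have hp : ¬ ('<' :: T').isPrefixOf (c :: (a ++ y)) = true := by
      simp [List.isPrefixOf]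
      intro h; exact absurd h.symm hc
    rw [List.cons_append, pvRepl_cons_neg _ _ _ _ hp, ih (fun h => ha (by simp [h]))]
    simp

-- prefix queries without '<'/'{' see through a replacement pass
theorem pvPref_repl (T' D' : List Char) :
    ∀ (t a : List Char), ('<' : Char) ∉ a → ('{' : Char) ∉ a →
      a.isPrefixOf (pvRepl ('<' :: T') ('{' :: D') t) = a.isPrefixOf t
  | [], a, _, _ => by rw [pvRepl_nil]
  | c :: t, a, ha1, ha2 => by
    by_cases hp : ('<' :: T').isPrefixOf (c :: t) = true
    · have hc : c = '<' := by
        simp [List.isPrefixOf] at hp; exact hp.1.symm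
      cases a with
      | nil => simp
      | cons x a' =>
        have hx1 : x ≠ '<' := fun h => ha1 (by simp [h])
        have hx2 : x ≠ '{' := fun h => ha2 (by simp [h])
        rw [pvRepl_cons_pos _ _ _ _ hp]
        have e1 : (x == '{') = false := by simp [hx2]
        have e2 : (x == '<') = false := by simp [hx1]
        simp [List.isPrefixOf, hc, e1, e2]
    · rw [pvRepl_cons_neg _ _ _ _ hp]
      cases a with
      | nil => simp
      | cons x a' =>
        simp only [List.isPrefixOf]
        rw [pvPref_repl T' D' t a' (fun h => ha1 (by simp [h])) (fun h => ha2 (by simp [h]))]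
termination_by t _ => t.length

-- literal forms of the six tokens and three replacements
theorem pvTU : "<user>".toList = ['<','u','s','e','r','>'] := rfl
theorem pvTUC : "<USER>".toList = ['<','U','S','E','R','>'] := rfl
theorem pvTC : "<char>".toList = ['<','c','h','a','r','>'] := rfl
theorem pvTCC : "<CHAR>".toList = ['<','C','H','A','R','>'] := rfl
theorem pvTP : "<persona>".toList = ['<','p','e','r','s','o','n','a','>'] := rfl
theorem pvTPC : "<PERSONA>".toList = ['<','P','E','R','S','O','N','A','>'] := rfl
theorem pvDU : "{{user}}".toList = ['{','{','u','s','e','r','}','}'] := rfl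
theorem pvDC : "{{char}}".toList = ['{','{','c','h','a','r','}','}'] := rfl
theorem pvDP : "{{persona}}".toList = ['{','{','p','e','r','s','o','n','a','}','}'] := rfl

-- a non-matching pass walks over a '<'-headed block whose body has no '<'
theorem pvSkip (T' D a y : List Char) (hne : ¬ ('<' :: T').isPrefixOf ('<' :: (a ++ y)) = true)
    (ha : ('<' : Char) ∉ a) :
    pvRepl ('<' :: T') D ('<' :: (a ++ y)) = '<' :: (a ++ pvRepl ('<' :: T') D y) := by
  rw [pvRepl_cons_neg _ _ _ _ hne, pvRepl_append _ _ _ _ ha]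

-- a matching pass replaces its own token at the head
theorem pvMatch (T' D y : List Char) :
    pvRepl ('<' :: T') D ('<' :: (T' ++ y)) = D ++ pvRepl ('<' :: T') D y := by
  have hp : ('<' :: T').isPrefixOf ('<' :: (T' ++ y)) = true := by
    exact (PySem.Chars.startswith_iff _ _).mpr ⟨y, rfl⟩
  rw [pvRepl_cons_pos _ _ _ _ hp]
  congr 1
  simp

-- the chain of A's six passes equals B's single scan
theorem pvChain_eq : ∀ l : List Char,
    pvRepl "<PERSONA>".toList "{{persona}}".toList
      (pvRepl "<persona>".toList "{{persona}}".toList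
        (pvRepl "<CHAR>".toList "{{char}}".toList
          (pvRepl "<char>".toList "{{char}}".toList
            (pvRepl "<USER>".toList "{{user}}".toList
              (pvRepl "<user>".toList "{{user}}".toList l))))) = pvScanB l
  | [] => by simp only [pvRepl_nil]; rw [pvScanB]
  | c :: t => by
    simp only [pvTU, pvTUC, pvTC, pvTCC, pvTP, pvTPC, pvDU, pvDC, pvDP]
    by_cases h1 : (['<','u','s','e','r','>'] : List Char).isPrefixOf (c :: t) = true
    · obtain ⟨rest, hr⟩ := (PySem.Chars.startswith_iff _ _).mp h1
      have he : c :: t = '<' :: (['u','s','e','r','>'] ++ rest) := hr.symm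
      have hlen : rest.length < t.length + 1 := by
        have := congrArg List.length he
        simp only [List.length_cons, List.length_append] at this
        omega
      rw [he]
      rw [pvMatch]
      rw [pvRepl_append _ _ _ _ (by decide)]
      rw [pvRepl_append _ _ _ _ (by decide)]
      rw [pvRepl_append _ _ _ _ (by decide)]
      rw [pvRepl_append _ _ _ _ (by decide)]
      rw [pvRepl_append _ _ _ _ (by decide)]
      have IH := pvChain_eq rest
      simp only [pvTU, pvTUC, pvTC, pvTCC, pvTP, pvTPC, pvDU, pvDC, pvDP] at IH
      rw [IH, pvScanB]
      simp [List.isPrefixOf]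
    · by_cases h2 : (['<','U','S','E','R','>'] : List Char).isPrefixOf (c :: t) = true
      · obtain ⟨rest, hr⟩ := (PySem.Chars.startswith_iff _ _).mp h2
        have he : c :: t = '<' :: (['U','S','E','R','>'] ++ rest) := hr.symm
        have hlen : rest.length < t.length + 1 := by
          have := congrArg List.length he
          simp only [List.length_cons, List.length_append] at this
          omega
        rw [he]
        rw [pvSkip _ _ _ _ (by simp [List.isPrefixOf]) (by decide)]
        rw [pvMatch]
        rw [pvRepl_append _ _ _ _ (by decide)]
        rw [pvRepl_append _ _ _ _ (by decide)]
        rw [pvRepl_append _ _ _ _ (by decide)]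
        rw [pvRepl_append _ _ _ _ (by decide)]
        have IH := pvChain_eq rest
        simp only [pvTU, pvTUC, pvTC, pvTCC, pvTP, pvTPC, pvDU, pvDC, pvDP] at IH
        rw [IH, pvScanB]
        simp [List.isPrefixOf]
      · by_cases h3 : (['<','c','h','a','r','>'] : List Char).isPrefixOf (c :: t) = true
        · obtain ⟨rest, hr⟩ := (PySem.Chars.startswith_iff _ _).mp h3
          have he : c :: t = '<' :: (['c','h','a','r','>'] ++ rest) := hr.symm
          have hlen : rest.length < t.length + 1 := by
            have := congrArg List.length he
            simp only [List.length_cons, List.length_append, List.length_nil] at this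
            omega
          rw [he]
          rw [pvSkip _ _ _ _ (by simp [List.isPrefixOf]) (by decide)]
          rw [pvSkip _ _ _ _ (by simp [List.isPrefixOf]) (by decide)]
          rw [pvMatch]
          rw [pvRepl_append _ _ _ _ (by decide)]
          rw [pvRepl_append _ _ _ _ (by decide)]
          rw [pvRepl_append _ _ _ _ (by decide)]
          have IH := pvChain_eq rest
          simp only [pvTU, pvTUC, pvTC, pvTCC, pvTP, pvTPC, pvDU, pvDC, pvDP] at IH
          rw [IH, pvScanB]
          simp [List.isPrefixOf]
        · by_cases h4 : (['<','C','H','A','R','>'] : List Char).isPrefixOf (c :: t) = true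
          · obtain ⟨rest, hr⟩ := (PySem.Chars.startswith_iff _ _).mp h4
            have he : c :: t = '<' :: (['C','H','A','R','>'] ++ rest) := hr.symm
            have hlen : rest.length < t.length + 1 := by
              have := congrArg List.length he
              simp only [List.length_cons, List.length_append, List.length_nil] at this
              omega
            rw [he]
            rw [pvSkip _ _ _ _ (by simp [List.isPrefixOf]) (by decide)]
            rw [pvSkip _ _ _ _ (by simp [List.isPrefixOf]) (by decide)]
            rw [pvSkip _ _ _ _ (by simp [List.isPrefixOf]) (by decide)]
            rw [pvMatch]
            rw [pvRepl_append _ _ _ _ (by decide)]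
            rw [pvRepl_append _ _ _ _ (by decide)]
            have IH := pvChain_eq rest
            simp only [pvTU, pvTUC, pvTC, pvTCC, pvTP, pvTPC, pvDU, pvDC, pvDP] at IH
            rw [IH, pvScanB]
            simp [List.isPrefixOf]
          · by_cases h5 : (['<','p','e','r','s','o','n','a','>'] : List Char).isPrefixOf (c :: t) = true
            · obtain ⟨rest, hr⟩ := (PySem.Chars.startswith_iff _ _).mp h5
              have he : c :: t = '<' :: (['p','e','r','s','o','n','a','>'] ++ rest) := hr.symm
              have hlen : rest.length < t.length + 1 := by
                have := congrArg List.length he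
                simp only [List.length_cons, List.length_append, List.length_nil] at this
                omega
              rw [he]
              rw [pvSkip _ _ _ _ (by simp [List.isPrefixOf]) (by decide)]
              rw [pvSkip _ _ _ _ (by simp [List.isPrefixOf]) (by decide)]
              rw [pvSkip _ _ _ _ (by simp [List.isPrefixOf]) (by decide)]
              rw [pvSkip _ _ _ _ (by simp [List.isPrefixOf]) (by decide)]
              rw [pvMatch]
              rw [pvRepl_append _ _ _ _ (by decide)]
              have IH := pvChain_eq rest
              simp only [pvTU, pvTUC, pvTC, pvTCC, pvTP, pvTPC, pvDU, pvDC, pvDP] at IH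
              rw [IH, pvScanB]
              simp [List.isPrefixOf]
            · by_cases h6 : (['<','P','E','R','S','O','N','A','>'] : List Char).isPrefixOf (c :: t) = true
              · obtain ⟨rest, hr⟩ := (PySem.Chars.startswith_iff _ _).mp h6
                have he : c :: t = '<' :: (['P','E','R','S','O','N','A','>'] ++ rest) := hr.symm
                have hlen : rest.length < t.length + 1 := by
                  have := congrArg List.length he
                  simp only [List.length_cons, List.length_append, List.length_nil] at this
                  omega
                rw [he]
                rw [pvSkip _ _ _ _ (by simp [List.isPrefixOf]) (by decide)]
                rw [pvSkip _ _ _ _ (by simp [List.isPrefixOf]) (by decide)]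
                rw [pvSkip _ _ _ _ (by simp [List.isPrefixOf]) (by decide)]
                rw [pvSkip _ _ _ _ (by simp [List.isPrefixOf]) (by decide)]
                rw [pvSkip _ _ _ _ (by simp [List.isPrefixOf]) (by decide)]
                rw [pvMatch]
                have IH := pvChain_eq rest
                simp only [pvTU, pvTUC, pvTC, pvTCC, pvTP, pvTPC, pvDU, pvDC, pvDP] at IH
                rw [IH, pvScanB]
                simp [List.isPrefixOf]
              · -- no token matches here: every pass keeps the head character
                have s1 : ∀ a : List Char, ('<' : Char) ∉ a → ('{' : Char) ∉ a →
                    a.isPrefixOf (pvRepl ['<','u','s','e','r','>'] ['{','{','u','s','e','r','}','}'] t) = a.isPrefixOf t :=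
                  fun a ha hb => pvPref_repl _ _ t a ha hb
                have s2 : ∀ a : List Char, ('<' : Char) ∉ a → ('{' : Char) ∉ a →
                    a.isPrefixOf (pvRepl ['<','U','S','E','R','>'] ['{','{','u','s','e','r','}','}'] (pvRepl ['<','u','s','e','r','>'] ['{','{','u','s','e','r','}','}'] t)) = a.isPrefixOf t :=
                  fun a ha hb => (pvPref_repl _ _ (pvRepl ['<','u','s','e','r','>'] ['{','{','u','s','e','r','}','}'] t) a ha hb).trans (s1 a ha hb)
                have s3 : ∀ a : List Char, ('<' : Char) ∉ a → ('{' : Char) ∉ a →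
                    a.isPrefixOf (pvRepl ['<','c','h','a','r','>'] ['{','{','c','h','a','r','}','}'] (pvRepl ['<','U','S','E','R','>'] ['{','{','u','s','e','r','}','}'] (pvRepl ['<','u','s','e','r','>'] ['{','{','u','s','e','r','}','}'] t))) = a.isPrefixOf t :=
                  fun a ha hb => (pvPref_repl _ _ (pvRepl ['<','U','S','E','R','>'] ['{','{','u','s','e','r','}','}'] (pvRepl ['<','u','s','e','r','>'] ['{','{','u','s','e','r','}','}'] t)) a ha hb).trans (s2 a ha hb)
                have s4 : ∀ a : List Char, ('<' : Char) ∉ a → ('{' : Char) ∉ a →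
                    a.isPrefixOf (pvRepl ['<','C','H','A','R','>'] ['{','{','c','h','a','r','}','}'] (pvRepl ['<','c','h','a','r','>'] ['{','{','c','h','a','r','}','}'] (pvRepl ['<','U','S','E','R','>'] ['{','{','u','s','e','r','}','}'] (pvRepl ['<','u','s','e','r','>'] ['{','{','u','s','e','r','}','}'] t)))) = a.isPrefixOf t :=
                  fun a ha hb => (pvPref_repl _ _ (pvRepl ['<','c','h','a','r','>'] ['{','{','c','h','a','r','}','}'] (pvRepl ['<','U','S','E','R','>'] ['{','{','u','s','e','r','}','}'] (pvRepl ['<','u','s','e','r','>'] ['{','{','u','s','e','r','}','}'] t))) a ha hb).trans (s3 a ha hb)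
                have s5 : ∀ a : List Char, ('<' : Char) ∉ a → ('{' : Char) ∉ a →
                    a.isPrefixOf (pvRepl ['<','p','e','r','s','o','n','a','>'] ['{','{','p','e','r','s','o','n','a','}','}'] (pvRepl ['<','C','H','A','R','>'] ['{','{','c','h','a','r','}','}'] (pvRepl ['<','c','h','a','r','>'] ['{','{','c','h','a','r','}','}'] (pvRepl ['<','U','S','E','R','>'] ['{','{','u','s','e','r','}','}'] (pvRepl ['<','u','s','e','r','>'] ['{','{','u','s','e','r','}','}'] t))))) = a.isPrefixOf t :=
                  fun a ha hb => (pvPref_repl _ _ (pvRepl ['<','C','H','A','R','>'] ['{','{','c','h','a','r','}','}'] (pvRepl ['<','c','h','a','r','>'] ['{','{','c','h','a','r','}','}'] (pvRepl ['<','U','S','E','R','>'] ['{','{','u','s','e','r','}','}'] (pvRepl ['<','u','s','e','r','>'] ['{','{','u','s','e','r','}','}'] t)))) a ha hb).trans (s4 a ha hb)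
                rw [pvRepl_cons_neg _ _ _ _ h1]
                have e2 : (['<','U','S','E','R','>'] : List Char).isPrefixOf (c :: (pvRepl ['<','u','s','e','r','>'] ['{','{','u','s','e','r','}','}'] t)) =
                    (['<','U','S','E','R','>'] : List Char).isPrefixOf (c :: t) := by
                  simp only [List.isPrefixOf]
                  rw [s1 _ (by decide) (by decide)]
                rw [pvRepl_cons_neg _ _ _ _ (by rw [e2]; exact h2)]
                have e3 : (['<','c','h','a','r','>'] : List Char).isPrefixOf (c :: (pvRepl ['<','U','S','E','R','>'] ['{','{','u','s','e','r','}','}'] (pvRepl ['<','u','s','e','r','>'] ['{','{','u','s','e','r','}','}'] t))) =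
                    (['<','c','h','a','r','>'] : List Char).isPrefixOf (c :: t) := by
                  simp only [List.isPrefixOf]
                  rw [s2 _ (by decide) (by decide)]
                rw [pvRepl_cons_neg _ _ _ _ (by rw [e3]; exact h3)]
                have e4 : (['<','C','H','A','R','>'] : List Char).isPrefixOf (c :: (pvRepl ['<','c','h','a','r','>'] ['{','{','c','h','a','r','}','}'] (pvRepl ['<','U','S','E','R','>'] ['{','{','u','s','e','r','}','}'] (pvRepl ['<','u','s','e','r','>'] ['{','{','u','s','e','r','}','}'] t)))) =
                    (['<','C','H','A','R','>'] : List Char).isPrefixOf (c :: t) := by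
                  simp only [List.isPrefixOf]
                  rw [s3 _ (by decide) (by decide)]
                rw [pvRepl_cons_neg _ _ _ _ (by rw [e4]; exact h4)]
                have e5 : (['<','p','e','r','s','o','n','a','>'] : List Char).isPrefixOf (c :: (pvRepl ['<','C','H','A','R','>'] ['{','{','c','h','a','r','}','}'] (pvRepl ['<','c','h','a','r','>'] ['{','{','c','h','a','r','}','}'] (pvRepl ['<','U','S','E','R','>'] ['{','{','u','s','e','r','}','}'] (pvRepl ['<','u','s','e','r','>'] ['{','{','u','s','e','r','}','}'] t))))) =
                    (['<','p','e','r','s','o','n','a','>'] : List Char).isPrefixOf (c :: t) := by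
                  simp only [List.isPrefixOf]
                  rw [s4 _ (by decide) (by decide)]
                rw [pvRepl_cons_neg _ _ _ _ (by rw [e5]; exact h5)]
                have e6 : (['<','P','E','R','S','O','N','A','>'] : List Char).isPrefixOf (c :: (pvRepl ['<','p','e','r','s','o','n','a','>'] ['{','{','p','e','r','s','o','n','a','}','}'] (pvRepl ['<','C','H','A','R','>'] ['{','{','c','h','a','r','}','}'] (pvRepl ['<','c','h','a','r','>'] ['{','{','c','h','a','r','}','}'] (pvRepl ['<','U','S','E','R','>'] ['{','{','u','s','e','r','}','}'] (pvRepl ['<','u','s','e','r','>'] ['{','{','u','s','e','r','}','}'] t)))))) =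
                    (['<','P','E','R','S','O','N','A','>'] : List Char).isPrefixOf (c :: t) := by
                  simp only [List.isPrefixOf]
                  rw [s5 _ (by decide) (by decide)]
                rw [pvRepl_cons_neg _ _ _ _ (by rw [e6]; exact h6)]
                have IH := pvChain_eq t
                simp only [pvTU, pvTUC, pvTC, pvTCC, pvTP, pvTPC, pvDU, pvDC, pvDP] at IH
                rw [IH, pvScanB]
                simp only [pvTU, pvTUC, pvTC, pvTCC, pvTP, pvTPC, pvDU, pvDC, pvDP]
                rw [if_neg h1, if_neg h2, if_neg h3, if_neg h4, if_neg h5, if_neg h6]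
termination_by l => l.length
decreasing_by all_goals (simp only [List.length_cons]; omega)

theorem pvStrReplace_eq (x o n : String) (ho : o.toList ≠ []) :
    PySem.Str.replace x o n = String.ofList (pvRepl o.toList n.toList x.toList) := by
  rw [PySem.Str.replace, pvReplace_eq _ _ _ ho]

theorem pvString_side (s : String) :
    normalize_legacy_angle_bracket_placeholders s = normalize_legacy_angle_bracket_placeholders_alt s := by
  unfold normalize_legacy_angle_bracket_placeholders normalize_legacy_angle_bracket_placeholders_alt
  by_cases h : s = ""
  · simp [h]
  · simp only [h, if_false]
    rw [pvStrReplace_eq _ _ _ (by decide), pvStrReplace_eq _ _ _ (by decide),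
        pvStrReplace_eq _ _ _ (by decide), pvStrReplace_eq _ _ _ (by decide),
        pvStrReplace_eq _ _ _ (by decide), pvStrReplace_eq _ _ _ (by decide)]
    simp only [String.toList_ofList]
    rw [pvChain_eq s.toList]

-- ===== VERDICT (by name: the statement is the Claim_ definition above) =====
theorem normalize_legacy_angle_bracket_placeholders_spec : Claim_equal_normalize_legacy_angle_bracket_placeholders := by
  intro text _
  unfold Spec_normalize_legacy_angle_bracket_placeholders
  exact pvString_side text
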